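-- pv_equiv track=rewrite | github.com/automata0001/data_mining | utils.py | balanced_factor_pair
-- ===== SOURCE A (Python) =====
-- def balanced_factor_pair(factors, x, y, i):
--     """Finds the most balanced pair of factors from the given prime factor list.
--
--     Here, balanced means both factors are minimized such that the sum of the two
--     factors is less than the sum of all other possible factor pairs.
--
--     Call with x and y initially set to 1, and i initially set to 0.
--
--     Args:
--         factors: List of prime factors.
--         x: Result factor x.
--         y: Result factor y.
--         i: Current index into factors list.
--
--     Returns:
--         A minimized factor pair as a list, [x, y].
--     """
--     if len(factors[i:]) == 0:
--         return [x, y]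
--     elif i == 0:
--         return balanced_factor_pair(factors, x * factors[i], y, i + 1)
--     else:
--         x1, y1 = balanced_factor_pair(factors, x * factors[i], y, i + 1)
--         x2, y2 = balanced_factor_pair(factors, x, y * factors[i], i + 1)
--
--         if x1 + y1 <= x2 + y2:
--             return [x1, y1]
--         else:
--             return [x2, y2]
-- ===== SOURCE B (Python) =====
-- def balanced_factor_pair(factors, x, y, i):
--     # Gather the factors the search ranges over, tagging the forced j == 0 slot.
--     seq = []
--     j = i
--     while len(factors[j:]) > 0:
--         seq.append((factors[j], j == 0))
--         j += 1
--     # Breadth-first product table with duplicate-state pruning, then one min scan.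
--     states = [(x, y)]
--     for f, forced in seq:
--         if forced:
--             states = [(a * f, b) for (a, b) in states]
--         else:
--             nxt, seen = [], set()
--             for (a, b) in states:
--                 for p in ((a * f, b), (a, b * f)):
--                     if p not in seen:
--                         seen.add(p)
--                         nxt.append(p)
--             states = nxt
--     best = min(states, key=lambda p: p[0] + p[1])
--     return [best[0], best[1]]
-- ===== Notes on version B (the rewrite author's own statement) =====
-- stated objective: alternative
-- what changed: A's branch-and-compare recursion (two recursive calls per factor, pairwise sum comparison on the way up) is replaced by an iterative breadth-first table of (x,y) product states with duplicate-state pruning via a seen-set and a single final min scan over the table.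
-- outside the precondition, e.g. on balanced_factor_pair([5], 1, 1, -3): A raises IndexError, B raises IndexError
import Mathlib
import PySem

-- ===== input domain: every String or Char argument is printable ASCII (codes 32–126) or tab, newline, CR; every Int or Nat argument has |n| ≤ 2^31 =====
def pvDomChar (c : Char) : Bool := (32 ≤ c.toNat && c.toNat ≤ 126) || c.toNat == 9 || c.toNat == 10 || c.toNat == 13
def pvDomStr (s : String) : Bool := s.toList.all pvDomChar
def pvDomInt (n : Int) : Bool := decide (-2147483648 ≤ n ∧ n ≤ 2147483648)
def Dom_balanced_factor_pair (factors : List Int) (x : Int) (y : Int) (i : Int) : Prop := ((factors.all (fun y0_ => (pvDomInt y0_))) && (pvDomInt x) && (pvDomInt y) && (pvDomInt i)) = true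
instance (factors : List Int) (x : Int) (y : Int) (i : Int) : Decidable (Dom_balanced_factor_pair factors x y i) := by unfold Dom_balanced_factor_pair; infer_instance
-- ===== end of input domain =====

-- B replaces A's exponential branch-and-compare recursion by an iterative breadth-first
-- product table with duplicate-state pruning and a single final min scan (objective: alternative).

-- termination helper used by both ports' recursion on the index
theorem pvSliceMeasure (xs : List Int) (i : Int)
    (h : ¬ (PySem.List.slice xs (some i) none).length = 0) :
    ((xs.length : Int) - (i + 1)).toNat < ((xs.length : Int) - i).toNat := by
  rw [PySem.List.slice_some_none] at h
  simp [List.length_drop, PySem.List.clampIdx] at h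
  split_ifs at h <;> omega

-- ===== PORT A =====
-- literal port of A; factors[i] is total pyGetD (in range whenever the slice is
-- nonempty and Pre_ holds; Python raises IndexError outside Pre_)
def balanced_factor_pair (factors : List Int) (x : Int) (y : Int) (i : Int) : List Int :=
  if (PySem.List.slice factors (some i) none).length = 0 then
    [x, y]
  else if i = 0 then
    balanced_factor_pair factors (x * PySem.List.pyGetD factors i 0) y (i + 1)
  else
    let r1 := balanced_factor_pair factors (x * PySem.List.pyGetD factors i 0) y (i + 1)
    let r2 := balanced_factor_pair factors x (y * PySem.List.pyGetD factors i 0) (i + 1)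
    let x1 := PySem.List.pyGetD r1 0 0
    let y1 := PySem.List.pyGetD r1 1 0
    let x2 := PySem.List.pyGetD r2 0 0
    let y2 := PySem.List.pyGetD r2 1 0
    if x1 + y1 ≤ x2 + y2 then [x1, y1] else [x2, y2]
termination_by ((factors.length : Int) - i).toNat
decreasing_by all_goals exact pvSliceMeasure factors i (by assumption)

-- ===== PORT B =====
-- the while loop of Source B collecting the visited factors, tagged forced at j == 0
def bfpSeq (factors : List Int) (j : Int) : List (Int × Bool) :=
  if (PySem.List.slice factors (some j) none).length = 0 then []
  else (PySem.List.pyGetD factors j 0, j == 0) :: bfpSeq factors (j + 1)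
termination_by ((factors.length : Int) - j).toNat
decreasing_by exact pvSliceMeasure factors j (by assumption)

def bfpBlock (f : Int) (p : Int × Int) : List (Int × Int) := [(p.1 * f, p.2), (p.1, p.2 * f)]

-- one loop iteration of Source B: forced → comprehension; else dedup-appending fold with a seen set
def bfpStep (st : List (Int × Int)) (fb : Int × Bool) : List (Int × Int) :=
  if fb.2 then st.map (fun p => (p.1 * fb.1, p.2))
  else (st.foldl (fun acc p => (bfpBlock fb.1 p).foldl
          (fun (acc : List (Int × Int) × PySem.Set (Int × Int)) q =>
             if acc.2.contains q then acc else (acc.1 ++ [q], acc.2.add q)) acc)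
        ([], PySem.Set.ofList [])).1

def balanced_factor_pair_alt (factors : List Int) (x : Int) (y : Int) (i : Int) : List Int :=
  let states := (bfpSeq factors i).foldl bfpStep [(x, y)]
  match PySem.List.min? states (fun p => p.1 + p.2) with
  | some best => [best.1, best.2]
  | none => [x, y]  -- unreachable: states is never empty, Python's min always sees a nonempty list

-- ===== PRECONDITION & SPEC =====
-- Pre_ excludes exactly the inputs where Python A raises IndexError (factors ≠ [] and
-- i < -len(factors): factors[i] is out of range while factors[i:] is nonempty); Source B raises there too.
def Pre_balanced_factor_pair (factors : List Int) (x : Int) (y : Int) (i : Int) : Prop :=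
  factors = [] ∨ -(factors.length : Int) ≤ i
instance (factors : List Int) (x : Int) (y : Int) (i : Int) : Decidable (Pre_balanced_factor_pair factors x y i) := by unfold Pre_balanced_factor_pair; infer_instance

def pvWitness_balanced_factor_pair : List Int × Int × Int × Int := ([2, 3, 5, 7], 1, 1, 0)

def Spec_balanced_factor_pair (factors : List Int) (x : Int) (y : Int) (i : Int) (out : List Int) : Prop := out = balanced_factor_pair_alt factors x y i
instance (factors : List Int) (x : Int) (y : Int) (i : Int) (out : List Int) : Decidable (Spec_balanced_factor_pair factors x y i out) := by unfold Spec_balanced_factor_pair; infer_instance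

-- ===== CLAIM (what is proved, stated in full; the proofs are below) =====
def Claim_equal_balanced_factor_pair : Prop := ∀ (factors : List Int) (x : Int) (y : Int) (i : Int), Dom_balanced_factor_pair factors x y i → Pre_balanced_factor_pair factors x y i → Spec_balanced_factor_pair factors x y i (balanced_factor_pair factors x y i)

-- ===== LEMMAS AND PROOFS =====


-- proof-side: first-minimum fold
def pvMin2 (m p : Int × Int) : Int × Int := if p.1 + p.2 < m.1 + m.2 then p else m

def fmA (b : Int × Int) (l : List (Int × Int)) : Int × Int := l.foldl pvMin2 b

def fm : List (Int × Int) → Int × Int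
  | [] => (0, 0)
  | h :: t => fmA h t

-- proof-side: the full (unpruned) leaf set of A's search tree
def leaves : List (Int × Bool) → Int → Int → List (Int × Int)
  | [], x, y => [(x, y)]
  | (f, true) :: r, x, y => leaves r (x * f) y
  | (f, false) :: r, x, y => leaves r (x * f) y ++ leaves r x (y * f)

-- proof-side: one unpruned step
def pstep (st : List (Int × Int)) (fb : Int × Bool) : List (Int × Int) :=
  if fb.2 then st.map (fun p => (p.1 * fb.1, p.2)) else st.flatMap (bfpBlock fb.1)

-- proof-side: canonical first-occurrence dedup
def cd : List (Int × Int) → List (Int × Int)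
  | [] => []
  | a :: l => a :: cd (l.filter (fun x => !(x == a)))
termination_by l => l.length
decreasing_by
  simp only [List.length_cons, List.length_unattach]
  exact Nat.lt_succ_of_le (le_trans (List.length_filter_le _ _) (by simp))

-- proof-side: B's seen-set dedup and the seen set it leaves behind
def dd (s : PySem.Set (Int × Int)) : List (Int × Int) → List (Int × Int)
  | [] => []
  | q :: l => if s.contains q then dd s l else q :: dd (s.add q) l

def ddSeen (s : PySem.Set (Int × Int)) : List (Int × Int) → PySem.Set (Int × Int)
  | [] => s
  | q :: l => if s.contains q then ddSeen s l else ddSeen (s.add q) l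

theorem foldl_none_some {β : Type} (f' : Option β → β → Option β) (g : β → β → β)
    (hn : ∀ a, f' none a = some a) (hfg : ∀ b a, f' (some b) a = some (g b a))
    (h : β) (t : List β) : List.foldl f' none (h :: t) = some (List.foldl g h t) := by
  rw [List.foldl_cons, hn]
  induction t generalizing h with
  | nil => rfl
  | cons c t ih => rw [List.foldl_cons, hfg, List.foldl_cons]; exact ih _

theorem min?_eq_fm (h : Int × Int) (t : List (Int × Int)) :
    PySem.List.min? (h :: t) (fun p => p.1 + p.2) = some (fm (h :: t)) := by
  unfold PySem.List.min? fm fmA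
  apply foldl_none_some
  · intro a; rfl
  · intro b a; simp only [pvMin2]; split <;> rfl

theorem fmA_append (b : Int × Int) (l1 l2 : List (Int × Int)) :
    fmA b (l1 ++ l2) = fmA (fmA b l1) l2 := List.foldl_append

theorem fmA_eq (l : List (Int × Int)) (hl : l ≠ []) (b : Int × Int) :
    fmA b l = if b.1 + b.2 ≤ (fm l).1 + (fm l).2 then b else fm l := by
  induction l generalizing b with
  | nil => exact absurd rfl hl
  | cons h t ih =>
    by_cases ht : t = []
    · subst ht
      simp only [fmA, fm, List.foldl_cons, List.foldl_nil, pvMin2]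
      split_ifs <;> first | rfl | omega
    · have h1 : fmA b (h :: t) = fmA (pvMin2 b h) t := rfl
      have h2 : fm (h :: t) = fmA h t := rfl
      rw [h1, ih ht (pvMin2 b h), h2, ih ht h]
      simp only [pvMin2]
      split_ifs <;> first | rfl | omega

theorem fm_append (l1 l2 : List (Int × Int)) (h1 : l1 ≠ []) (h2 : l2 ≠ []) :
    fm (l1 ++ l2) = if (fm l1).1 + (fm l1).2 ≤ (fm l2).1 + (fm l2).2 then fm l1 else fm l2 := by
  cases l1 with
  | nil => exact absurd rfl h1
  | cons h t =>
    have : fm ((h :: t) ++ l2) = fmA (fm (h :: t)) l2 := by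
      show fmA h (t ++ l2) = _
      rw [fmA_append]; rfl
    rw [this, fmA_eq l2 h2]

theorem leaves_ne_nil (s : List (Int × Bool)) (x y : Int) : leaves s x y ≠ [] := by
  induction s generalizing x y with
  | nil => simp [leaves]
  | cons fb r ih =>
    obtain ⟨f, b⟩ := fb
    cases b <;> simp [leaves, ih]

theorem run_append (s : List (Int × Bool)) (L1 L2 : List (Int × Int)) :
    s.foldl pstep (L1 ++ L2) = s.foldl pstep L1 ++ s.foldl pstep L2 := by
  induction s generalizing L1 L2 with
  | nil => simp
  | cons fb s ih =>
    have : pstep (L1 ++ L2) fb = pstep L1 fb ++ pstep L2 fb := by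
      simp only [pstep]; split <;> simp
    simp only [List.foldl_cons, this, ih]

theorem leaves_eq_run (s : List (Int × Bool)) (x y : Int) :
    leaves s x y = s.foldl pstep [(x, y)] := by
  induction s generalizing x y with
  | nil => simp [leaves]
  | cons fb r ih =>
    obtain ⟨f, b⟩ := fb
    cases b with
    | true =>
      show leaves r (x * f) y = List.foldl pstep (pstep [(x, y)] (f, true)) r
      rw [ih]; rfl
    | false =>
      show leaves r (x * f) y ++ leaves r x (y * f)
          = List.foldl pstep (pstep [(x, y)] (f, false)) r
      have hp : pstep [(x, y)] (f, false) = [(x * f, y)] ++ [(x, y * f)] := rfl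
      rw [hp, run_append, ih, ih]


theorem cd_nil : cd [] = [] := by rw [cd]

theorem cd_cons (a : Int × Int) (l : List (Int × Int)) :
    cd (a :: l) = a :: cd (l.filter (fun x => !(x == a))) := by rw [cd]

theorem cd_filter (p : Int × Int → Bool) :
    ∀ l : List (Int × Int), cd (l.filter p) = (cd l).filter p := by
  intro l
  induction l using cd.induct with
  | case1 => simp [cd_nil]
  | case2 a l ih =>
    simp only [List.unattach_filter, List.unattach_attach] at ih
    by_cases hpa : p a = true
    · rw [List.filter_cons_of_pos hpa, cd_cons, cd_cons, List.filter_cons_of_pos hpa,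
        List.filter_filter, ← ih, List.filter_filter]
      congr 2
      exact List.filter_congr (fun x _ => Bool.and_comm _ _)
    · rw [List.filter_cons_of_neg (by simpa using hpa), cd_cons,
        List.filter_cons_of_neg (by simpa using hpa), ← ih, List.filter_filter]
      congr 1
      apply List.filter_congr
      intro x _
      by_cases hx : x = a
      · subst hx; simp [hpa]
      · simp [hx]

theorem cd_append (M : List (Int × Int)) :
    ∀ X : List (Int × Int),
      cd (M ++ X) = cd M ++ cd (X.filter (fun x => !(M.contains x))) := by
  induction M using cd.induct with
  | case1 => intro X; simp [cd_nil]
  | case2 b M' ih =>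
    simp only [List.unattach_filter, List.unattach_attach] at ih
    intro X
    rw [List.cons_append, cd_cons, cd_cons, List.filter_append, ih (X.filter (fun x => !(x == b))),
      List.cons_append]
    congr 2
    rw [List.filter_filter]
    congr 1
    apply List.filter_congr
    intro x _
    by_cases hxb : x = b
    · subst hxb; simp
    · have hb : (x == b) = false := by simp [hxb]
      simp only [List.contains_cons, hb, Bool.not_false, Bool.and_true]
      congr 1
      rw [Bool.eq_iff_iff]
      simp [List.mem_filter, hb]

theorem filter_not_contains_self (m : List (Int × Int)) :
    m.filter (fun x => !(m.contains x)) = [] := by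
  rw [List.filter_eq_nil_iff]
  intro x hx
  simp [hx]

theorem block_kill (g : Int × Int → List (Int × Int)) (a : Int × Int) :
    ∀ l : List (Int × Int),
      (l.flatMap g).filter (fun x => !((g a).contains x))
        = ((l.filter (fun x => !(x == a))).flatMap g).filter (fun x => !((g a).contains x)) := by
  intro l
  induction l with
  | nil => rfl
  | cons c l ih =>
    by_cases hc : c = a
    · subst hc
      rw [List.flatMap_cons, List.filter_append, filter_not_contains_self,
        List.filter_cons_of_neg (by simp), List.nil_append, ih]
    · rw [List.flatMap_cons, List.filter_cons_of_pos (by simp [hc]), List.flatMap_cons,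
        List.filter_append, List.filter_append, ih]

theorem cd_flatMap (g : Int × Int → List (Int × Int)) :
    ∀ L : List (Int × Int), cd ((cd L).flatMap g) = cd (L.flatMap g) := by
  intro L
  induction L using cd.induct with
  | case1 => rw [cd_nil]
  | case2 a l ih =>
    simp only [List.unattach_filter, List.unattach_attach] at ih
    rw [cd_cons, List.flatMap_cons, List.flatMap_cons, cd_append, cd_append,
      cd_filter, ih, ← cd_filter, ← block_kill]

theorem mem_cd : ∀ (L : List (Int × Int)) (x : Int × Int), x ∈ cd L → x ∈ L := by
  intro L
  induction L using cd.induct with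
  | case1 => intro x hx; rw [cd_nil] at hx; exact absurd hx (List.not_mem_nil)
  | case2 a l ih =>
    simp only [List.unattach_filter, List.unattach_attach] at ih
    intro x hx
    rw [cd_cons, List.mem_cons] at hx
    rcases hx with h | h
    · exact h ▸ List.mem_cons_self
    · exact List.mem_cons_of_mem a (List.mem_of_mem_filter (ih x h))

theorem cd_idem : ∀ L : List (Int × Int), cd (cd L) = cd L := by
  intro L
  induction L using cd.induct with
  | case1 => rw [cd_nil, cd_nil]
  | case2 a l ih =>
    simp only [List.unattach_filter, List.unattach_attach] at ih
    rw [cd_cons, cd_cons, cd_filter, ih]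
    congr 1
    rw [List.filter_eq_self]
    intro x hx
    have := List.mem_filter.mp (mem_cd _ x hx)
    exact this.2

theorem cd_map (h : Int × Int → Int × Int) (L : List (Int × Int)) :
    cd ((cd L).map h) = cd (L.map h) := by
  rw [List.map_eq_flatMap, List.map_eq_flatMap]
  exact cd_flatMap _ L

theorem dd_cd : ∀ (l : List (Int × Int)) (s : PySem.Set (Int × Int)),
    dd s l = cd (l.filter (fun x => !(s.contains x))) := by
  intro l
  induction l with
  | nil => intro s; rw [dd]; simp [cd_nil]
  | cons q l ih =>
    intro s
    by_cases hc : s.contains q = true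
    · rw [dd, if_pos hc, List.filter_cons_of_neg (by rw [hc]; simp), ih]
    · rw [dd, if_neg hc, List.filter_cons_of_pos (by rw [eq_false_of_ne_true hc]; simp), cd_cons,
        ih (s.add q), List.filter_filter]
      congr 2
      apply List.filter_congr
      intro x _
      rw [show s.add q = s ++ [q] from by rw [PySem.Set.add, if_neg hc]]
      by_cases hxq : x = q
      · subst hxq; simp
      · simp [hxq]

theorem dd_empty_cd (L : List (Int × Int)) : dd (PySem.Set.ofList []) L = cd L := by
  rw [show PySem.Set.ofList ([] : List (Int × Int)) = [] from rfl, dd_cd]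
  congr 1
  rw [List.filter_eq_self]
  intro x _
  simp


theorem dd_append (N : List (Int × Int)) :
    ∀ (M : List (Int × Int)) (s : PySem.Set (Int × Int)),
      dd s (M ++ N) = dd s M ++ dd (ddSeen s M) N := by
  intro M
  induction M with
  | nil => intro s; rfl
  | cons q M ih =>
    intro s
    by_cases hc : s.contains q = true
    · rw [List.cons_append, dd, if_pos hc, dd, if_pos hc, ih,
        show ddSeen s (q :: M) = ddSeen s M from by rw [ddSeen, if_pos hc]]
    · rw [List.cons_append, dd, if_neg hc, dd, if_neg hc, ih,
        show ddSeen s (q :: M) = ddSeen (s.add q) M from by rw [ddSeen, if_neg hc],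
        List.cons_append]

theorem ddSeen_append (N : List (Int × Int)) :
    ∀ (M : List (Int × Int)) (s : PySem.Set (Int × Int)),
      ddSeen s (M ++ N) = ddSeen (ddSeen s M) N := by
  intro M
  induction M with
  | nil => intro s; rfl
  | cons q M ih =>
    intro s
    by_cases hc : s.contains q = true
    · rw [List.cons_append, ddSeen, if_pos hc, ih, ddSeen, if_pos hc]
    · rw [List.cons_append, ddSeen, if_neg hc, ih, ddSeen, if_neg hc]

theorem fold1 (M : List (Int × Int)) :
    ∀ (acc : List (Int × Int)) (s : PySem.Set (Int × Int)),
      M.foldl (fun (acc : List (Int × Int) × PySem.Set (Int × Int)) q =>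
          if acc.2.contains q then acc else (acc.1 ++ [q], acc.2.add q)) (acc, s)
        = (acc ++ dd s M, ddSeen s M) := by
  induction M with
  | nil => intro acc s; simp [dd, ddSeen]
  | cons q M ih =>
    intro acc s
    by_cases hc : s.contains q = true
    · rw [List.foldl_cons, show (if (acc, s).2.contains q then (acc, s)
          else ((acc, s).1 ++ [q], (acc, s).2.add q)) = (acc, s) from if_pos hc,
        ih, dd, if_pos hc, ddSeen, if_pos hc]
    · rw [List.foldl_cons, show (if (acc, s).2.contains q then (acc, s)
          else ((acc, s).1 ++ [q], (acc, s).2.add q)) = (acc ++ [q], s.add q) from if_neg hc,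
        ih, dd, if_neg hc, ddSeen, if_neg hc, List.append_assoc, List.singleton_append]

theorem bstep_fold (f : Int) (st : List (Int × Int)) :
    ∀ (acc : List (Int × Int)) (s : PySem.Set (Int × Int)),
      st.foldl (fun acc p => (bfpBlock f p).foldl
          (fun (acc : List (Int × Int) × PySem.Set (Int × Int)) q =>
             if acc.2.contains q then acc else (acc.1 ++ [q], acc.2.add q)) acc) (acc, s)
        = (acc ++ dd s (st.flatMap (bfpBlock f)), ddSeen s (st.flatMap (bfpBlock f))) := by
  induction st with
  | nil => intro acc s; simp [dd, ddSeen]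
  | cons p st ih =>
    intro acc s
    rw [List.foldl_cons, fold1, ih, List.flatMap_cons, dd_append, ddSeen_append,
      List.append_assoc]

theorem bstep_eq (f : Int) (st : List (Int × Int)) :
    bfpStep st (f, false) = dd (PySem.Set.ofList []) (st.flatMap (bfpBlock f)) := by
  rw [show bfpStep st (f, false) = (st.foldl (fun acc p => (bfpBlock f p).foldl
      (fun (acc : List (Int × Int) × PySem.Set (Int × Int)) q =>
         if acc.2.contains q then acc else (acc.1 ++ [q], acc.2.add q)) acc)
      ([], PySem.Set.ofList [])).1 from rfl, bstep_fold]
  rfl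

theorem fmA_dd : ∀ (l : List (Int × Int)) (b : Int × Int) (s : PySem.Set (Int × Int)),
    (∀ x, s.contains x = true → b.1 + b.2 ≤ x.1 + x.2) → fmA b (dd s l) = fmA b l := by
  intro l
  induction l with
  | nil => intro b s _; rfl
  | cons q l ih =>
    intro b s hs
    by_cases hc : s.contains q = true
    · rw [dd, if_pos hc, ih b s hs,
        show fmA b (q :: l) = fmA (pvMin2 b q) l from rfl,
        show pvMin2 b q = b from by rw [pvMin2, if_neg (by have := hs q hc; omega)]]
    · rw [dd, if_neg hc,
        show fmA b (q :: dd (s.add q) l) = fmA (pvMin2 b q) (dd (s.add q) l) from rfl,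
        show fmA b (q :: l) = fmA (pvMin2 b q) l from rfl]
      apply ih
      intro x hx
      have hx' : x ∈ s ++ [q] := by
        rw [show s.add q = s ++ [q] from by rw [PySem.Set.add, if_neg hc]] at hx
        exact List.contains_iff_mem.mp hx
      rcases List.mem_append.mp hx' with h | h
      · have := hs x (List.contains_iff_mem.mpr h)
        rw [pvMin2]; split <;> omega
      · have hxq : x = q := by simpa using h
        subst hxq
        rw [pvMin2]; split <;> omega

theorem fm_cd : ∀ L : List (Int × Int), L ≠ [] → fm (cd L) = fm L := by
  intro L hL
  cases L with
  | nil => exact absurd rfl hL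
  | cons h t =>
    rw [cd_cons, show fm (h :: cd (t.filter (fun x => !(x == h)))) =
        fmA h (cd (t.filter (fun x => !(x == h)))) from rfl,
      show fm (h :: t) = fmA h t from rfl]
    have hdd : cd (t.filter (fun x => !(x == h))) = dd ([h] : PySem.Set (Int × Int)) t := by
      rw [dd_cd]
      congr 1
      apply List.filter_congr
      intro x _
      by_cases hxh : x = h
      · subst hxh; simp
      · simp [hxh]
    rw [hdd]
    apply fmA_dd
    intro x hx
    have : x = h := by simpa using hx
    subst this; omega

theorem bsim : ∀ (s : List (Int × Bool)) (D L : List (Int × Int)), cd D = cd L →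
    cd (s.foldl bfpStep D) = cd (s.foldl pstep L) := by
  intro s
  induction s with
  | nil => intro D L h; exact h
  | cons fb s ih =>
    intro D L h
    rw [List.foldl_cons, List.foldl_cons]
    apply ih
    obtain ⟨f, bb⟩ := fb
    cases bb with
    | true =>
      rw [show bfpStep D (f, true) = D.map (fun p => (p.1 * f, p.2)) from rfl,
        show pstep L (f, true) = L.map (fun p => (p.1 * f, p.2)) from rfl,
        ← cd_map, h, cd_map]
    | false =>
      rw [bstep_eq, dd_empty_cd, cd_idem,
        show pstep L (f, false) = L.flatMap (bfpBlock f) from rfl,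
        ← cd_flatMap, h, cd_flatMap]

theorem bfpSeq_empty (factors : List Int) (i : Int)
    (h : (PySem.List.slice factors (some i) none).length = 0) : bfpSeq factors i = [] := by
  rw [bfpSeq, if_pos h]

theorem bfpSeq_cons (factors : List Int) (i : Int)
    (h : ¬ (PySem.List.slice factors (some i) none).length = 0) :
    bfpSeq factors i = (PySem.List.pyGetD factors i 0, i == 0) :: bfpSeq factors (i + 1) := by
  rw [bfpSeq, if_neg h]

theorem pyGetD_pair_fst (p : Int × Int) : PySem.List.pyGetD [p.1, p.2] 0 0 = p.1 := by
  simp [pysem]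

theorem pyGetD_pair_snd (p : Int × Int) : PySem.List.pyGetD [p.1, p.2] 1 0 = p.2 := by
  simp [pysem]

theorem A_case3_common (factors : List Int) (x y i : Int)
    (h : ¬ (PySem.List.slice factors (some i) none).length = 0) (hi : ¬ i = 0)
    (ih1 : balanced_factor_pair factors (x * PySem.List.pyGetD factors i 0) y (i + 1)
      = [(fm (leaves (bfpSeq factors (i + 1)) (x * PySem.List.pyGetD factors i 0) y)).1,
         (fm (leaves (bfpSeq factors (i + 1)) (x * PySem.List.pyGetD factors i 0) y)).2])
    (ih2 : balanced_factor_pair factors x (y * PySem.List.pyGetD factors i 0) (i + 1)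
      = [(fm (leaves (bfpSeq factors (i + 1)) x (y * PySem.List.pyGetD factors i 0))).1,
         (fm (leaves (bfpSeq factors (i + 1)) x (y * PySem.List.pyGetD factors i 0))).2]) :
    balanced_factor_pair factors x y i
      = [(fm (leaves (bfpSeq factors i) x y)).1, (fm (leaves (bfpSeq factors i) x y)).2] := by
  rw [balanced_factor_pair, if_neg h, if_neg hi, ih1, ih2, bfpSeq_cons factors i h,
    show (i == 0) = false from by simp [hi]]
  rw [show leaves ((PySem.List.pyGetD factors i 0, false) :: bfpSeq factors (i + 1)) x y
      = leaves (bfpSeq factors (i + 1)) (x * PySem.List.pyGetD factors i 0) y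
        ++ leaves (bfpSeq factors (i + 1)) x (y * PySem.List.pyGetD factors i 0) from rfl,
    fm_append _ _ (leaves_ne_nil _ _ _) (leaves_ne_nil _ _ _)]
  simp only [pyGetD_pair_fst, pyGetD_pair_snd]
  split_ifs <;> rfl

theorem A_eq_fm_leaves (factors : List Int) : ∀ (x y i : Int),
    balanced_factor_pair factors x y i
      = [(fm (leaves (bfpSeq factors i) x y)).1, (fm (leaves (bfpSeq factors i) x y)).2] := by
  intro x y i
  induction x, y, i using balanced_factor_pair.induct factors with
  | case1 x y i h =>
    rw [balanced_factor_pair, if_pos h, bfpSeq_empty factors i h]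
    rfl
  | case2 x y h ih =>
    rw [balanced_factor_pair, if_neg h, if_pos rfl, ih, bfpSeq_cons factors 0 h]
    rfl
  | case3 x y i h hi r1 r2 x1 y1 x2 y2 hle ih1 ih2 => exact A_case3_common factors x y i h hi ih1 ih2
  | case4 x y i h hi r1 r2 x1 y1 x2 y2 hle ih1 ih2 => exact A_case3_common factors x y i h hi ih1 ih2

theorem B_eq_fm_leaves (factors : List Int) (x y i : Int) :
    balanced_factor_pair_alt factors x y i
      = [(fm (leaves (bfpSeq factors i) x y)).1, (fm (leaves (bfpSeq factors i) x y)).2] := by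
  have hcd : cd ((bfpSeq factors i).foldl bfpStep [(x, y)])
      = cd (leaves (bfpSeq factors i) x y) := by
    rw [bsim _ _ _ rfl, ← leaves_eq_run]
  have hne : (bfpSeq factors i).foldl bfpStep [(x, y)] ≠ [] := by
    intro h0
    rw [h0, cd_nil] at hcd
    cases hL : leaves (bfpSeq factors i) x y with
    | nil => exact leaves_ne_nil _ _ _ hL
    | cons a t => rw [hL, cd_cons] at hcd; exact List.cons_ne_nil _ _ hcd.symm
  have hfm : fm ((bfpSeq factors i).foldl bfpStep [(x, y)]) = fm (leaves (bfpSeq factors i) x y) := by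
    rw [← fm_cd _ hne, hcd, fm_cd _ (leaves_ne_nil _ _ _)]
  obtain ⟨a, t, hst⟩ : ∃ a t, (bfpSeq factors i).foldl bfpStep [(x, y)] = a :: t := by
    cases hs : (bfpSeq factors i).foldl bfpStep [(x, y)] with
    | nil => exact absurd hs hne
    | cons a t => exact ⟨a, t, rfl⟩
  rw [← hfm, hst]
  unfold balanced_factor_pair_alt
  rw [hst]
  show (match PySem.List.min? (a :: t) (fun p => p.1 + p.2) with
    | some best => [best.1, best.2] | none => [x, y]) = [(fm (a :: t)).1, (fm (a :: t)).2]
  rw [min?_eq_fm]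

-- ===== VERDICT (by name: the statement is the Claim_ definition above) =====
theorem balanced_factor_pair_spec : Claim_equal_balanced_factor_pair := by
  intro factors x y i _ _
  unfold Spec_balanced_factor_pair
  rw [A_eq_fm_leaves, B_eq_fm_leaves]
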